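-- pv_equiv track=rewrite | github.com/mraiser/newbound | runtime/securitybot/src/newbound/robot/securitybot.py | checkGroups
-- ===== SOURCE A (Python) =====
-- def checkGroups(groups, rules):
--     include = False
--     exclude = False
--     if 'anonymous' in rules:
--         perm = rules['anonymous']
--         if perm == 'include': include = True
--     for group in groups:
--         if group in rules:
--             perm = rules[group]
--             if perm == 'include': include = True
--             elif perm == 'exclude': exclude = True
--     if (exclude):
--         raise Exception('UNAUTHORIZED')
--
--     return include
-- ===== SOURCE B (Python) =====
-- def checkGroups(groups, rules):
--     # Rule-driven: one pass over rules.items(), membership-tested against a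
--     # set of the caller's groups (dict lookups on rules disappear entirely).
--     wanted = set(groups)
--     include = False
--     for key, perm in rules.items():
--         if perm == 'include':
--             if key == 'anonymous' or key in wanted:
--                 include = True
--         elif perm == 'exclude':
--             if key in wanted:
--                 raise Exception('UNAUTHORIZED')
--     return include
-- ===== Notes on version B (the rewrite author's own statement) =====
-- stated objective: alternative
-- what changed: Inverts the traversal: instead of looping over groups and looking each one up in the rules dict, B builds a set of the groups once and makes a single pass over rules.items(), testing each rule key for membership; the asymmetry that 'anonymous' only grants include is kept.
import Mathlib
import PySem

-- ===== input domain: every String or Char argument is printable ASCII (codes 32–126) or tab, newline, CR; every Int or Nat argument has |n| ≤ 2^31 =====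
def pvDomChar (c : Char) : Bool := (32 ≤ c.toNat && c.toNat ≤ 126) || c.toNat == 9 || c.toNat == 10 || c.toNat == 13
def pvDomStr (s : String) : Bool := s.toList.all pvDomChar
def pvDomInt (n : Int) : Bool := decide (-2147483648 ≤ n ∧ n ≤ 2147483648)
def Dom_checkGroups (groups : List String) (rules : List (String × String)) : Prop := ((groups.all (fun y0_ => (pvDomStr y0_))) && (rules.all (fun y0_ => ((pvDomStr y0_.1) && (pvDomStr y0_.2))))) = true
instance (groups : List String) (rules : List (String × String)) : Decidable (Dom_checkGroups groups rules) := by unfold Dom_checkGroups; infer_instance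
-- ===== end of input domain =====

-- B inverts the traversal: one pass over the rule items tested against a set of the groups,
-- instead of A's loop over groups with a dict lookup each. Objective: alternative decomposition.
-- Pre_ excludes inputs where A (and B) raise Exception('UNAUTHORIZED'), and requires distinct
-- rule keys (a Python dict cannot carry duplicate keys, so this excludes no Python input).


-- ===== PORT A =====
-- the body of A's for-loop, as a fold step over the mutable (include, exclude) pair
def checkGroupsStep (rules : List (String × String)) (st : Bool × Bool) (group : String) : Bool × Bool :=
  match (PySem.Dict.mk rules).get? group with
  | some perm =>
      if perm == "include" then (true, st.2)
      else if perm == "exclude" then (st.1, true)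
      else st
  | none => st

-- A's 'if exclude: raise' is the exception Pre_ excludes, so the port returns include.
def checkGroups (groups : List String) (rules : List (String × String)) : Bool :=
  let include0 : Bool :=
    match (PySem.Dict.mk rules).get? "anonymous" with
    | some perm => if perm == "include" then true else false
    | none => false
  let st := groups.foldl (checkGroupsStep rules) (include0, false)
  st.1

-- ===== PORT B =====
-- B's loop over rules.items(); the 'exclude' branch only raises (outside Pre_), so the
-- fold carries the include flag (exact where no item fires the raise, i.e. on all of Pre_).
def checkGroups_alt (groups : List String) (rules : List (String × String)) : Bool :=
  let wanted : PySem.Set String := PySem.Set.ofList groups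
  rules.foldl
    (fun inc kv =>
      if kv.2 == "include" then
        (if kv.1 == "anonymous" || wanted.contains kv.1 then true else inc)
      else inc)
    false

-- ===== PRECONDITION & SPEC =====
-- Pre_ excludes exactly the inputs on which A raises Exception('UNAUTHORIZED') (some group
-- whose rule is 'exclude'); it also requires the rule keys to be distinct, which excludes no
-- input expressible as a Python dict.
def Pre_checkGroups (groups : List String) (rules : List (String × String)) : Prop :=
  (rules.map Prod.fst).Nodup ∧ ∀ g ∈ groups, (PySem.Dict.mk rules).get? g ≠ some "exclude"
instance (groups : List String) (rules : List (String × String)) : Decidable (Pre_checkGroups groups rules) := by unfold Pre_checkGroups; infer_instance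
def pvWitness_checkGroups : List String × (List (String × String)) :=
  (["admin", "user"], [("admin", "include"), ("guest", "exclude")])

def Spec_checkGroups (groups : List String) (rules : List (String × String)) (out : Bool) : Prop := out = checkGroups_alt groups rules
instance (groups : List String) (rules : List (String × String)) (out : Bool) : Decidable (Spec_checkGroups groups rules out) := by unfold Spec_checkGroups; infer_instance

-- ===== CLAIM =====
def Claim_equal_checkGroups : Prop := ∀ (groups : List String) (rules : List (String × String)), Dom_checkGroups groups rules → Pre_checkGroups groups rules → Spec_checkGroups groups rules (checkGroups groups rules)

-- ===== LEMMAS AND PROOFS =====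
-- the include component of A's fold is the initial flag OR-ed with the any-scan over groups
theorem checkGroups_fold_fst (rules : List (String × String)) (gs : List String)
    (inc exc : Bool) :
    (gs.foldl (checkGroupsStep rules) (inc, exc)).1
    = (inc || gs.any (fun g => (PySem.Dict.mk rules).get? g == some "include")) := by
  induction gs generalizing inc exc with
  | nil => simp
  | cons g gs ih =>
    simp only [List.foldl_cons, List.any_cons]
    cases h : (PySem.Dict.mk rules).get? g with
    | none =>
      rw [show checkGroupsStep rules (inc, exc) g = (inc, exc) by simp [checkGroupsStep, h], ih]
      simp
    | some perm =>
      by_cases hp : perm = "include"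
      · subst hp
        rw [show checkGroupsStep rules (inc, exc) g = (true, exc) by simp [checkGroupsStep, h], ih]
        simp
      · by_cases hq : perm = "exclude"
        · subst hq
          rw [show checkGroupsStep rules (inc, exc) g = (inc, true) by simp [checkGroupsStep, h], ih]
          simp
        · rw [show checkGroupsStep rules (inc, exc) g = (inc, exc) by simp [checkGroupsStep, h, hp, hq], ih]
          have hb : (perm == "include") = false := beq_eq_false_iff_ne.mpr hp
          simp [hb]

-- B's fold is an any-scan over the rule items
theorem checkGroups_alt_fold (rules : List (String × String)) (p : String × String → Bool)
    (b : Bool) :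
    rules.foldl (fun inc kv => if p kv then true else inc) b = (b || rules.any p) := by
  induction rules generalizing b with
  | nil => simp
  | cons kv rest ih =>
    simp only [List.foldl_cons, List.any_cons, ih]
    by_cases h : p kv = true <;> simp [h]

-- ===== VERDICT =====
theorem checkGroups_spec : Claim_equal_checkGroups := by
  intro groups rules _ hpre
  obtain ⟨hnd, _⟩ := hpre
  have hkeys : (PySem.Dict.mk rules).keys.Nodup := by
    simpa [PySem.Dict.keys] using hnd
  unfold Spec_checkGroups checkGroups checkGroups_alt
  simp only [checkGroups_fold_fst]
  have h1 := checkGroups_alt_fold rules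
    (fun kv => kv.2 == "include" && (kv.1 == "anonymous" || (PySem.Set.ofList groups).contains kv.1)) false
  simp only [Bool.false_or] at h1
  have h2 :
      (rules.foldl
        (fun inc kv =>
          if kv.2 == "include" then
            (if kv.1 == "anonymous" || (PySem.Set.ofList groups).contains kv.1 then true else inc)
          else inc) false)
      = rules.foldl
        (fun inc kv =>
          if kv.2 == "include" && (kv.1 == "anonymous" || (PySem.Set.ofList groups).contains kv.1)
          then true else inc) false := by
    have hfg :
        (fun (inc : Bool) (kv : String × String) =>
          if kv.2 == "include" then
            (if kv.1 == "anonymous" || (PySem.Set.ofList groups).contains kv.1 then true else inc)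
          else inc)
        = (fun (inc : Bool) (kv : String × String) =>
          if kv.2 == "include" && (kv.1 == "anonymous" || (PySem.Set.ofList groups).contains kv.1)
          then true else inc) := by
      funext b kv
      by_cases ha : kv.2 = "include"
      · by_cases hb : (kv.1 == "anonymous" || (PySem.Set.ofList groups).contains kv.1) = true <;>
          simp [ha, hb]
      · simp [ha]
    rw [hfg]
  rw [h2, h1]
  apply Bool.eq_iff_iff.mpr
  constructor
  · intro h
    rcases Bool.or_eq_true_iff.mp h with h | h
    · -- the anonymous flag fired: get? "anonymous" = some "include"
      have hget : (PySem.Dict.mk rules).get? "anonymous" = some "include" := by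
        revert h
        cases hg : (PySem.Dict.mk rules).get? "anonymous" with
        | none => simp
        | some perm => by_cases hp : perm = "include" <;> simp [hp]
      have hmem : ("anonymous", "include") ∈ rules :=
        PySem.Dict.mem_items_of_get?_eq_some _ hget
      rw [List.any_eq_true]
      exact ⟨_, hmem, by simp⟩
    · rw [List.any_eq_true] at h
      obtain ⟨g, hg, hq⟩ := h
      have hget : (PySem.Dict.mk rules).get? g = some "include" := by
        simpa using hq
      have hmem : (g, "include") ∈ rules := PySem.Dict.mem_items_of_get?_eq_some _ hget
      rw [List.any_eq_true]
      refine ⟨_, hmem, ?_⟩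
      simp [PySem.Set.mem_ofList, hg]
  · intro h
    rw [List.any_eq_true] at h
    obtain ⟨kv, hkv, hp⟩ := h
    simp only [Bool.and_eq_true, beq_iff_eq, Bool.or_eq_true] at hp
    obtain ⟨hinc, hkey⟩ := hp
    have hget : (PySem.Dict.mk rules).get? kv.1 = some "include" := by
      have hm : (kv.1, kv.2) ∈ (PySem.Dict.mk rules).items := hkv
      have := PySem.Dict.get?_of_mem_items _ hm hkeys
      rwa [hinc] at this
    apply Bool.or_eq_true_iff.mpr
    rcases hkey with hkey | hkey
    · left
      rw [hkey] at hget
      simp [hget]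
    · right
      rw [List.any_eq_true]
      have hg : kv.1 ∈ groups := by
        simpa [PySem.Set.mem_ofList] using hkey
      exact ⟨kv.1, hg, by simp [hget]⟩
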